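-- pv_equiv track=rewrite | github.com/4anon/yatzy_game | maxiscoring.py | villa
-- ===== SOURCE A (Python) =====
-- def villa(dice):
--     counts={}
--     for die in dice:
--         if die in counts:
--             counts[die]+=1
--         else:
--             counts[die]=1
--     threeofkind=0
--     for die in counts:
--         if counts[die]==3:
--             threeofkind+=1
--     if threeofkind==2:
--         return sum(dice)
--     return 0
-- ===== SOURCE B (Python) =====
-- def villa(dice):
--     if sum(dice.count(x) == 3 for x in dice) == 6:
--         return sum(dice)
--     return 0
-- ===== Notes on version B (the rewrite author's own statement) =====
-- stated objective: alternative
-- what changed: Drops the frequency dictionary entirely: each element is tested individually with dice.count(x)==3, and since every value forming a triple contributes exactly 3 qualifying elements, exactly two triples exist iff exactly 6 elements qualify.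
import Mathlib
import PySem

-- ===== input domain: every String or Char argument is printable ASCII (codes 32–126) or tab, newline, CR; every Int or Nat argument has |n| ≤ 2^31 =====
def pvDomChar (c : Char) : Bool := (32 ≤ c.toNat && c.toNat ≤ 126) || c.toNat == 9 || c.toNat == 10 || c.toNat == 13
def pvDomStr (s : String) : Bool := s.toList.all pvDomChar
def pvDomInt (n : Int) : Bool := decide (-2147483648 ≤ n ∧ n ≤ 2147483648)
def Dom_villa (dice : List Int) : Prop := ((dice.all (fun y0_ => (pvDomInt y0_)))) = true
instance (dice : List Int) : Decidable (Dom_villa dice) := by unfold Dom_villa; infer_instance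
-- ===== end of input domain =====

-- B drops A's frequency dictionary: it tests each element with dice.count(x)==3 and compares
-- the number of qualifying elements with 6 (alternative decomposition); equal on all inputs.

-- ===== PORT A =====
-- counts = {} ; for die in dice: increment (counts[die] += 1 reads the present key, so getD is exact)
def villaCounts (dice : List Int) : PySem.Dict Int Int :=
  dice.foldl (fun d die =>
    if d.contains die then d.insert die (d.getD die 0 + 1) else d.insert die 1)
    PySem.Dict.empty

-- threeofkind = 0 ; for die in counts: if counts[die] == 3: threeofkind += 1
def villaThreeofkind (dice : List Int) : Int :=
  (villaCounts dice).keys.foldl (fun acc die =>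
    if (villaCounts dice).getD die 0 == 3 then acc + 1 else acc) 0

def villa (dice : List Int) : Int :=
  if villaThreeofkind dice == 2 then dice.sum else 0

-- ===== PORT B =====
-- if sum(dice.count(x) == 3 for x in dice) == 6: return sum(dice); return 0
def villa_alt (dice : List Int) : Int :=
  if ((dice.countP (fun x => dice.count x == 3) : Int) == 6) then dice.sum else 0

-- ===== PRECONDITION & SPEC =====
def Spec_villa (dice : List Int) (out : Int) : Prop := out = villa_alt dice
instance (dice : List Int) (out : Int) : Decidable (Spec_villa dice out) := by unfold Spec_villa; infer_instance

-- ===== CLAIM (what is proved, stated in full; the proofs are below) =====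
def Claim_equal_villa : Prop := ∀ (dice : List Int), Dom_villa dice → Spec_villa dice (villa dice)

-- ===== LEMMAS AND PROOFS =====

-- countP as a sum of per-value contributions over the distinct values
lemma countP_eq_sum_toFinset (l : List Int) (p : Int → Bool) :
    l.countP p = ∑ a ∈ l.toFinset, if p a then l.count a else 0 := by
  rw [List.countP_eq_length_filter, ← List.sum_toFinset_count_eq_length]
  rw [Finset.sum_subset (by intro a ha; simp_all [List.mem_toFinset]
        : (l.filter p).toFinset ⊆ l.toFinset)
      (by intro a _ ha
          simp only [List.mem_toFinset] at ha
          exact List.count_eq_zero.mpr ha)]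
  apply Finset.sum_congr rfl
  intro a _
  by_cases hp : p a
  · simp [hp, List.count_filter hp]
  · simp only [hp, Bool.false_eq_true, if_false]
    exact List.count_eq_zero.mpr (by simp [List.mem_filter, hp])

-- each value with multiplicity 3 contributes exactly 3 qualifying elements
lemma countP_count_three (l : List Int) :
    l.countP (fun x => l.count x == 3)
      = 3 * (PySem.List.dedup l).countP (fun u => l.count u == 3) := by
  rw [countP_eq_sum_toFinset, countP_eq_sum_toFinset]
  have hfs : (PySem.List.dedup l).toFinset = l.toFinset := by
    apply Finset.ext
    intro a
    rw [List.mem_toFinset, List.mem_toFinset, PySem.List.mem_dedup]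
  rw [hfs, Finset.mul_sum]
  apply Finset.sum_congr rfl
  intro a ha
  have hmem : a ∈ l := List.mem_toFinset.mp ha
  have hd : (PySem.List.dedup l).count a = 1 :=
    List.count_eq_one_of_mem (PySem.List.nodup_dedup l) ((PySem.List.mem_dedup l a).mpr hmem)
  rw [PySem.List.dedup_eq_ofList] at hd
  by_cases h : l.count a = 3
  · simp [h, hd]
  · simp [h]

-- the Nat test n == 3 survives the cast to Int
lemma beq_natCast_three (c : Nat) : (((c : Int)) == 3) = (c == 3) := by
  by_cases hc : c = 3
  · simp [hc]
  · have h1 : (c == 3) = false := by simp [hc]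
    have h2 : (((c : Int)) == 3) = false := by
      simp only [beq_eq_false_iff_ne, ne_eq]
      omega
    rw [h1, h2]

-- A's two loops compute the number of distinct values of multiplicity 3
lemma villaCounts_eq_counter (dice : List Int) :
    villaCounts dice = PySem.Dict.counter dice := by
  rw [villaCounts, ← PySem.Dict.foldl_insert_getD_add_one_eq_counter]
  have hf : (fun (d : PySem.Dict Int Int) die =>
      if d.contains die then d.insert die (d.getD die 0 + 1) else d.insert die 1)
      = (fun d die => d.insert die (d.getD die 0 + 1)) := by
    funext d x
    by_cases h : d.contains x
    · simp [h]
    · have h0 : d.getD x 0 = 0 :=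
        PySem.Dict.getD_of_not_contains d 0 (by simpa using h)
      simp [h, h0]
  rw [hf]

lemma threeofkind_eq (dice : List Int) :
    villaThreeofkind dice
      = ((PySem.List.dedup dice).countP (fun u => dice.count u == 3) : Int) := by
  rw [villaThreeofkind, villaCounts_eq_counter,
    PySem.List.foldl_if_add_one, PySem.Dict.keys_counter]
  have hpred : (fun die => (PySem.Dict.counter dice).getD die 0 == 3)
      = (fun u => dice.count u == 3) := by
    funext u
    rw [PySem.Dict.getD_counter]
    exact beq_natCast_three _
  rw [hpred, ← PySem.List.dedup_eq_ofList]
  simp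

-- ===== VERDICT (by name: the statement is the Claim_ definition above) =====
theorem villa_spec : Claim_equal_villa := by
  intro dice _
  show villa dice = villa_alt dice
  rw [villa, villa_alt, threeofkind_eq, countP_count_three]
  set N := (PySem.List.dedup dice).countP (fun u => dice.count u == 3) with hN
  by_cases h2 : N = 2
  · simp [h2]
  · have hA : ((N : Int) == 2) = false := by
      simp only [beq_eq_false_iff_ne, ne_eq]
      omega
    have hB : (((3 * N : Nat) : Int) == 6) = false := by
      simp only [beq_eq_false_iff_ne, ne_eq]
      omega
    rw [hA, hB]
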